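-- pv_equiv track=rewrite | github.com/boostcampDinosaur/coding-test-study | ryu/programmers/lv1/대충 만든 자판.py | solution
-- ===== SOURCE A (Python) =====
-- def solution(keymaps, targets):
--     answer = []
--     key_dict = dict()
--
--     for keymap in keymaps:
--         for i, ch in enumerate(keymap, 1):
--             if not ch in key_dict:
--                 key_dict[ch] = i
--             elif key_dict[ch] > i:
--                 key_dict[ch] = i
--
--     for target in targets:
--         click = 0
--         for ch in target:
--             if ch in key_dict:
--                 click += key_dict[ch]
--             else:
--                 click = -1
--                 break
--
--         answer.append(click)
--
--     return answer
-- ===== SOURCE B (Python) =====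
-- def solution(keymaps, targets):
--     answer = []
--     for target in targets:
--         total = 0
--         for ch in target:
--             best = None
--             for km in keymaps:
--                 if ch in km:
--                     p = km.index(ch) + 1
--                     if best is None or p < best:
--                         best = p
--             if best is None:
--                 total = -1
--                 break
--             total += best
--         answer.append(total)
--     return answer
-- ===== Notes on version B (the rewrite author's own statement) =====
-- stated objective: alternative
-- what changed: B drops A's precomputed global char->min-position dict and instead, per target character, rescans the keymaps keeping a running minimum of first-occurrence positions (index-table-first replaced by on-demand scanning).
import Mathlib
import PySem

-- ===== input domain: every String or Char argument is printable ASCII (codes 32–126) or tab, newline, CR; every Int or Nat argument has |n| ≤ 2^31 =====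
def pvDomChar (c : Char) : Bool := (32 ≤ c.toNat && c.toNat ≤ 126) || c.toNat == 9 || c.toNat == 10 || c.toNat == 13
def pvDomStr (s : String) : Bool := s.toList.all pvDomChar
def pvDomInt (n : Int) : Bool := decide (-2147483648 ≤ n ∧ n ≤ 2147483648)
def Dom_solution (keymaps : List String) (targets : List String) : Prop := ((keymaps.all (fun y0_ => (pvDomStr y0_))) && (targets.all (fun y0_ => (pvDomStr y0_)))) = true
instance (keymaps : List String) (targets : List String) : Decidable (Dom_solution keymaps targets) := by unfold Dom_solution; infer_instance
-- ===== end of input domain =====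

-- B replaces A's precomputed char→min-position dict by an on-demand per-character rescan of the keymaps (alternative decomposition, not claimed faster).

-- ===== PORT A =====
-- inner dict-update step: `if not ch in key_dict: ... elif key_dict[ch] > i: ...`
def solStep (d : PySem.Dict Char Int) (p : Int × Char) : PySem.Dict Char Int :=
  match d.get? p.2 with
  | none => d.insert p.2 p.1
  | some v => if v > p.1 then d.insert p.2 p.1 else d

def solBuild (keymaps : List String) : PySem.Dict Char Int :=
  keymaps.foldl (fun d km => (PySem.List.enumerate km.toList 1).foldl solStep d) PySem.Dict.empty

-- the `for ch in target` loop with its `break`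
def solClick (d : PySem.Dict Char Int) : List Char → Int → Int
  | [], click => click
  | ch :: rest, click =>
    match d.get? ch with
    | some v => solClick d rest (click + v)
    | none => -1

def solution (keymaps : List String) (targets : List String) : List Int :=
  let d := solBuild keymaps
  targets.map (fun t => solClick d t.toList 0)

-- ===== PORT B =====
-- the `for km in keymaps` running-minimum scan for one character
def altBest (keymaps : List String) (ch : Char) : Option Int :=
  keymaps.foldl (fun best km =>
    match PySem.List.index? km.toList ch with
    | none => best
    | some k =>
      let p : Int := (k : Int) + 1
      match best with
      | none => some p
      | some b => if p < b then some p else best) none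

def altLoop (keymaps : List String) : List Char → Int → Int
  | [], total => total
  | ch :: rest, total =>
    match altBest keymaps ch with
    | none => -1
    | some m => altLoop keymaps rest (total + m)

def solution_alt (keymaps : List String) (targets : List String) : List Int :=
  targets.map (fun t => altLoop keymaps t.toList 0)

-- ===== PRECONDITION & SPEC =====
def Spec_solution (keymaps : List String) (targets : List String) (out : List Int) : Prop := out = solution_alt keymaps targets
instance (keymaps : List String) (targets : List String) (out : List Int) : Decidable (Spec_solution keymaps targets out) := by unfold Spec_solution; infer_instance

-- ===== CLAIM (what is proved, stated in full; the proofs are below) =====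
def Claim_equal_solution : Prop := ∀ (keymaps : List String) (targets : List String), Dom_solution keymaps targets → Spec_solution keymaps targets (solution keymaps targets)

-- ===== LEMMAS AND PROOFS =====
-- optional-min combinator used to characterise both programs' per-char value
def omin (o q : Option Int) : Option Int :=
  match o, q with
  | none, q => q
  | some a, none => some a
  | some a, some b => if b < a then some b else some a

-- first position (index + s) of ch in l, as an Option
def fpos (l : List Char) (ch : Char) (s : Int) : Option Int :=
  match PySem.List.index? l ch with
  | none => none
  | some k => some ((k : Int) + s)

lemma fpos_cons_self (l : List Char) (ch : Char) (s : Int) :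
    fpos (ch :: l) ch s = some s := by
  unfold fpos
  rw [PySem.List.index?_cons_self]
  simp

lemma omin_some_some (a b : Int) : omin (some a) (some b) = if b < a then some b else some a := rfl

lemma fpos_cons_of_ne (l : List Char) (c ch : Char) (s : Int) (h : c ≠ ch) :
    fpos (c :: l) ch s = fpos l ch (s + 1) := by
  unfold fpos
  rw [PySem.List.index?_cons_of_ne l h]
  cases PySem.List.index? l ch with
  | none => rfl
  | some k => simp; ring

lemma omin_none_right (o : Option Int) : omin o none = o := by cases o <;> rfl

lemma omin_absorb (o : Option Int) (s t : Int) (h : s < t) :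
    omin (omin o (some s)) (some t) = omin o (some s) := by
  cases o with
  | none =>
    show omin (some s) (some t) = some s
    rw [omin_some_some, if_neg (by omega)]
  | some a =>
    show omin (omin (some a) (some s)) (some t) = omin (some a) (some s)
    rw [omin_some_some a s]
    split_ifs with h1
    · rw [omin_some_some, if_neg (by omega)]
    · rw [omin_some_some, if_neg (by omega)]

-- one keymap's inner fold updates each key to the min of its old value and the first occurrence position
lemma inner_fold (ch : Char) :
    ∀ (l : List Char) (s : Int) (d : PySem.Dict Char Int),
    ((PySem.List.enumerate l s).foldl solStep d).get? ch
      = omin (d.get? ch) (fpos l ch s) := by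
  intro l
  induction l with
  | nil =>
    intro s d
    rw [PySem.List.enumerate_nil]
    simp [fpos, PySem.List.index?_eq_idxOf?, omin_none_right]
  | cons c l ih =>
    intro s d
    rw [PySem.List.enumerate_cons, List.foldl_cons, ih]
    by_cases hc : ch = c
    · subst hc
      rw [fpos_cons_self]
      have hd : (solStep d (s, ch)).get? ch = omin (d.get? ch) (some s) := by
        unfold solStep
        cases hg : d.get? ch with
        | none => simp [omin, PySem.Dict.get?_insert_self]
        | some v =>
          rw [omin_some_some]
          show (if s < v then d.insert ch s else d).get? ch = if s < v then some s else some v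
          split_ifs with h1
          · simp [PySem.Dict.get?_insert_self]
          · exact hg
      rw [hd]
      cases hf : fpos l ch (s + 1) with
      | none => exact omin_none_right _
      | some t =>
        have ht : s < t := by
          unfold fpos at hf
          cases hk : PySem.List.index? l ch with
          | none => rw [hk] at hf; exact absurd hf (by simp)
          | some k =>
            rw [hk] at hf
            have : ((k : Int) + (s + 1)) = t := by simpa using hf
            have := Int.natCast_nonneg k
            omega
        exact omin_absorb _ _ _ ht
    · rw [fpos_cons_of_ne _ _ _ _ (fun h => hc h.symm)]
      have hd : (solStep d (s, c)).get? ch = d.get? ch := by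
        unfold solStep
        cases hg : d.get? c with
        | none => simp [PySem.Dict.get?_insert_of_ne _ _ hc]
        | some v =>
          simp only
          split_ifs with h
          · simp [PySem.Dict.get?_insert_of_ne _ _ hc]
          · rfl
      rw [hd]

-- A's built dict agrees pointwise with B's running-minimum scan
lemma build_eq_best (keymaps : List String) (ch : Char) :
    (solBuild keymaps).get? ch = altBest keymaps ch := by
  unfold solBuild altBest
  have hfun : (fun (best : Option Int) (km : String) =>
      match PySem.List.index? km.toList ch with
      | none => best
      | some k =>
        let p : Int := (k : Int) + 1
        match best with
        | none => some p
        | some b => if p < b then some p else best)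
      = (fun best km => omin best (fpos km.toList ch 1)) := by
    funext best km
    unfold fpos
    cases PySem.List.index? km.toList ch with
    | none => exact (omin_none_right best).symm
    | some k =>
      cases best with
      | none => rfl
      | some b => rfl
  rw [hfun]
  have key : ∀ (L : List String) (d : PySem.Dict Char Int),
      (L.foldl (fun d km => (PySem.List.enumerate km.toList 1).foldl solStep d) d).get? ch
        = L.foldl (fun o km => omin o (fpos km.toList ch 1)) (d.get? ch) := by
    intro L
    induction L with
    | nil => intro d; rfl
    | cons km L ihL =>
      intro d
      simp only [List.foldl_cons]
      rw [ihL, inner_fold]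
  rw [key keymaps PySem.Dict.empty, PySem.Dict.get?_empty]

lemma click_eq_loop (keymaps : List String) :
    ∀ (l : List Char) (acc : Int),
    solClick (solBuild keymaps) l acc = altLoop keymaps l acc := by
  intro l
  induction l with
  | nil => intro acc; rfl
  | cons ch rest ih =>
    intro acc
    unfold solClick altLoop
    rw [build_eq_best]
    cases altBest keymaps ch with
    | none => rfl
    | some v => exact ih _

-- ===== VERDICT (by name: the statement is the Claim_ definition above) =====
theorem solution_spec : Claim_equal_solution := by
  intro keymaps targets _
  unfold Spec_solution solution solution_alt
  simp only
  exact List.map_congr_left (fun t _ => click_eq_loop keymaps t.toList 0)
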